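-- pv_equiv track=rewrite | github.com/ericfecke/sharper-margins | tools/fetch_context.py | _find_team_record
-- ===== SOURCE A (Python) =====
-- def _find_team_record(team_name: str, records: list) -> dict | None:
--     """Find team record by fuzzy name match."""
--     if not records:
--         return None
--     normalized = _normalize_team_name(team_name)
--     for rec in records:
--         if normalized in _normalize_team_name(rec.get("team_name", "")):
--             return rec
--         if normalized in _normalize_team_name(rec.get("team_abbr", "")):
--             return rec
--     # Partial match fallback
--     for rec in records:
--         rec_name = _normalize_team_name(rec.get("team_name", ""))
--         # Check if any word in team_name matches
--         for word in normalized.split():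
--             if len(word) > 3 and word in rec_name:
--                 return rec
--     return None
--
-- def _normalize_team_name(name: str) -> str:
--     """Lowercase, remove common suffixes for matching."""
--     return name.lower().strip()
-- ===== SOURCE B (Python) =====
-- def _find_team_record(team_name: str, records: list) -> dict | None:
--     """Single pass: a full/abbr substring match returns immediately; the first
--     record with a long-word (len>3) match in team_name is kept as fallback."""
--     query = team_name.lower().strip()
--     words = [w for w in query.split() if len(w) > 3]
--     fallback = None
--     for rec in records:
--         name = rec.get("team_name", "").lower().strip()
--         if query in name or query in rec.get("team_abbr", "").lower().strip():
--             return rec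
--         if fallback is None and any(w in name for w in words):
--             fallback = rec
--     return fallback
-- ===== Notes on version B (the rewrite author's own statement) =====
-- stated objective: faster
-- what changed: Replaces A's two sequential scans (full/abbr-match scan, then a separate word-fallback scan) by a single pass that returns on a full/abbr match and records the first long-word fallback candidate; the query's long words are filtered once up front and each record's team_name is normalized once per pass.
import Mathlib
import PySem

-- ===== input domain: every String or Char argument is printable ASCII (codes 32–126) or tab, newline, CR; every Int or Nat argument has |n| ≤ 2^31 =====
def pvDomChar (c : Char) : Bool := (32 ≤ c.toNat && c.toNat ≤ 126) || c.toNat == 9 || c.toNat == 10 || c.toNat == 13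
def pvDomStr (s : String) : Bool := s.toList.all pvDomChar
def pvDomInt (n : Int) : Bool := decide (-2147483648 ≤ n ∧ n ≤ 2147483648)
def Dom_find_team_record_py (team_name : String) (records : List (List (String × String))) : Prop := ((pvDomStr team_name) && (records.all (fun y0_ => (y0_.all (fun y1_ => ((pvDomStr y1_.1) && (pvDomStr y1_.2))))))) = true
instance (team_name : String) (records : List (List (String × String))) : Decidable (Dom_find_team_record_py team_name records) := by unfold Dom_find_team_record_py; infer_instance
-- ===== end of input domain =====

-- B makes one pass, returning on a full/abbr match and recording the first long-word
-- fallback candidate, instead of A's two separate passes over the records (alternative; return value only).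

-- ===== PORT A =====
-- _normalize_team_name: name.lower().strip()
def pvNorm (name : String) : String := PySem.Str.strip (PySem.Str.lower name)

-- first loop of A: full / abbr substring match
def pvALoop1 (normalized : String) : List (List (String × String)) → Option (List (String × String))
  | [] => none
  | r :: rest =>
    if PySem.Str.isIn normalized (pvNorm ((PySem.Dict.ofList r).getD "team_name" "")) then some r
    else if PySem.Str.isIn normalized (pvNorm ((PySem.Dict.ofList r).getD "team_abbr" "")) then some r
    else pvALoop1 normalized rest

-- second loop of A: word (len > 3) match against team_name
def pvALoop2 (normalized : String) : List (List (String × String)) → Option (List (String × String))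
  | [] => none
  | r :: rest =>
    let recName := pvNorm ((PySem.Dict.ofList r).getD "team_name" "")
    if (PySem.Str.split₀ normalized).any
        (fun w => decide (3 < PySem.Str.len w) && PySem.Str.isIn w recName) then some r
    else pvALoop2 normalized rest

def find_team_record_py (team_name : String) (records : List (List (String × String))) : Option (List (String × String)) :=
  if records = [] then none
  else
    let normalized := pvNorm team_name
    match pvALoop1 normalized records with
    | some r => some r
    | none => pvALoop2 normalized records

-- ===== PORT B =====
-- single pass with a fallback accumulator
def pvBLoop (query : String) (words : List String) (fallback : Option (List (String × String))) :
    List (List (String × String)) → Option (List (String × String))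
  | [] => fallback
  | r :: rest =>
    let name := pvNorm ((PySem.Dict.ofList r).getD "team_name" "")
    if PySem.Str.isIn query name ||
       PySem.Str.isIn query (pvNorm ((PySem.Dict.ofList r).getD "team_abbr" "")) then some r
    else
      pvBLoop query words
        (if fallback.isNone && words.any (fun w => PySem.Str.isIn w name) then some r else fallback)
        rest

def find_team_record_py_alt (team_name : String) (records : List (List (String × String))) : Option (List (String × String)) :=
  let query := pvNorm team_name
  let words := (PySem.Str.split₀ query).filter (fun w => decide (3 < PySem.Str.len w))
  pvBLoop query words none records

-- ===== PRECONDITION & SPEC =====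
def Spec_find_team_record_py (team_name : String) (records : List (List (String × String))) (out : Option (List (String × String))) : Prop := out = find_team_record_py_alt team_name records
instance (team_name : String) (records : List (List (String × String))) (out : Option (List (String × String))) : Decidable (Spec_find_team_record_py team_name records out) := by unfold Spec_find_team_record_py; infer_instance

-- ===== CLAIM (what is proved, stated in full; the proofs are below) =====
def Claim_equal_find_team_record_py : Prop := ∀ (team_name : String) (records : List (List (String × String))), Dom_find_team_record_py team_name records → Spec_find_team_record_py team_name records (find_team_record_py team_name records)

-- ===== LEMMAS AND PROOFS =====

-- the single pass equals: first loop, else the recorded fallback, else the second loop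
theorem pvBLoop_eq (q : String) (fb : Option (List (String × String)))
    (records : List (List (String × String))) :
    pvBLoop q ((PySem.Str.split₀ q).filter (fun w => decide (3 < PySem.Str.len w))) fb records =
      match pvALoop1 q records with
      | some r => some r
      | none => match fb with
        | some f => some f
        | none => pvALoop2 q records := by
  induction records generalizing fb with
  | nil => cases fb <;> simp [pvBLoop, pvALoop1, pvALoop2]
  | cons r rest ih =>
    simp only [pvBLoop, pvALoop1, pvALoop2]
    by_cases h1 : PySem.Str.isIn q (pvNorm ((PySem.Dict.ofList r).getD "team_name" "")) = true
    · simp only [h1, Bool.true_or, reduceIte]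
    · by_cases h2 : PySem.Str.isIn q (pvNorm ((PySem.Dict.ofList r).getD "team_abbr" "")) = true
      · simp only [h1, h2, Bool.or_true, Bool.false_eq_true, reduceIte]
      · simp only [h1, h2, Bool.or_self, Bool.false_eq_true, reduceIte, ih]
        have hany : ((PySem.Str.split₀ q).filter (fun w => decide (3 < PySem.Str.len w))).any
              (fun w => PySem.Str.isIn w (pvNorm ((PySem.Dict.ofList r).getD "team_name" ""))) =
            (PySem.Str.split₀ q).any
              (fun w => decide (3 < PySem.Str.len w) &&
                PySem.Str.isIn w (pvNorm ((PySem.Dict.ofList r).getD "team_name" ""))) := by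
          simp [List.any_filter]
        cases fb with
        | some f => simp
        | none =>
          simp only [Option.isNone_none, Bool.true_and, hany]
          by_cases h3 : (PySem.Str.split₀ q).any
              (fun w => decide (3 < PySem.Str.len w) &&
                PySem.Str.isIn w (pvNorm ((PySem.Dict.ofList r).getD "team_name" ""))) = true
          · simp only [h3, reduceIte]
          · simp only [h3, Bool.false_eq_true, reduceIte]

-- ===== VERDICT (by name: the statement is the Claim_ definition above) =====
theorem find_team_record_py_spec : Claim_equal_find_team_record_py := by
  intro team_name records _
  unfold Spec_find_team_record_py find_team_record_py find_team_record_py_alt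
  rw [pvBLoop_eq]
  cases records with
  | nil => simp [pvALoop1, pvALoop2]
  | cons r rest => simp
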